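-- pv_equiv track=rewrite | github.com/WindChimeRan/applebench | correctness/scripts/score_f1.py | normalize_to_canonical
-- ===== SOURCE A (Python) =====
-- def normalize_to_canonical(predicted: str | None, categories: list[str]) -> str | None:
--     """Case-insensitive match of predicted string to canonical category list."""
--     if predicted is None:
--         return None
--     pred_l = predicted.strip().lower()
--     for cat in categories:
--         if cat.lower() == pred_l:
--             return cat
--     # Minor variations (e.g., "Weather Events" ↔ "Weather")
--     for cat in categories:
--         if cat.lower() in pred_l or pred_l in cat.lower():
--             return cat
--     return None
-- ===== SOURCE B (Python) =====
-- def normalize_to_canonical(predicted, categories):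
--     """Case-insensitive match of predicted string to canonical category list.
--     Single pass keeping the first exact and first substring match."""
--     if predicted is None:
--         return None
--     pred_l = predicted.strip().lower()
--     first_exact = None
--     first_sub = None
--     for cat in categories:
--         cl = cat.lower()
--         if first_exact is None and cl == pred_l:
--             first_exact = cat
--         if first_sub is None and (cl in pred_l or pred_l in cl):
--             first_sub = cat
--     return first_exact if first_exact is not None else first_sub
-- ===== Notes on version B (the rewrite author's own statement) =====
-- stated objective: alternative
-- what changed: Replaced A's two sequential scans (exact then substring) with a single pass that carries two accumulators, first_exact and first_sub, each set only on its first match, returning first_exact if set else first_sub.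
import Mathlib
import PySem

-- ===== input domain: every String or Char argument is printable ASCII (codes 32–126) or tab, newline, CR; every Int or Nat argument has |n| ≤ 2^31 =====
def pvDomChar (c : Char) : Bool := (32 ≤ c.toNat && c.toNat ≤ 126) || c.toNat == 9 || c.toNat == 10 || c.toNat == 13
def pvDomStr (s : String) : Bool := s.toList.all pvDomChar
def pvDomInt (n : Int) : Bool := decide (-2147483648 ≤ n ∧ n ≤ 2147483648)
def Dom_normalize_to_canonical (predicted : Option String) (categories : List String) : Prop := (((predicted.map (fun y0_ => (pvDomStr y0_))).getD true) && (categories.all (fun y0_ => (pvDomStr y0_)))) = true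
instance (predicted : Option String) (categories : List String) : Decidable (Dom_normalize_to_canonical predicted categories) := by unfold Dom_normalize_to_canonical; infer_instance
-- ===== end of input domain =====

-- B replaces A's two sequential scans by ONE pass carrying two accumulators (first exact, first substring match); same result, stated honestly as an alternative decomposition.

-- ===== PORT A =====
-- first loop of A: return the first cat with cat.lower() == pred_l
def loopExact (pred_l : String) : List String → Option String
  | [] => none
  | c :: cs => if PySem.Str.lower c == pred_l then some c else loopExact pred_l cs

-- second loop of A: return the first cat with cat.lower() in pred_l or pred_l in cat.lower()
def loopSub (pred_l : String) : List String → Option String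
  | [] => none
  | c :: cs =>
    if PySem.Str.isIn (PySem.Str.lower c) pred_l || PySem.Str.isIn pred_l (PySem.Str.lower c) then
      some c
    else loopSub pred_l cs

def normalize_to_canonical (predicted : Option String) (categories : List String) : Option String :=
  match predicted with
  | none => none
  | some p =>
    let pred_l := PySem.Str.lower (PySem.Str.strip p)
    match loopExact pred_l categories with
    | some c => some c
    | none => loopSub pred_l categories

-- ===== PORT B =====
-- one step of B's single loop over categories, updating (first_exact, first_sub)
def altStep (pred_l : String) (st : Option String × Option String) (cat : String) :
    Option String × Option String :=
  let cl := PySem.Str.lower cat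
  let e := if st.1.isNone && (cl == pred_l) then some cat else st.1
  let s := if st.2.isNone && (PySem.Str.isIn cl pred_l || PySem.Str.isIn pred_l cl) then some cat else st.2
  (e, s)

def normalize_to_canonical_alt (predicted : Option String) (categories : List String) : Option String :=
  match predicted with
  | none => none
  | some p =>
    let pred_l := PySem.Str.lower (PySem.Str.strip p)
    let r := categories.foldl (altStep pred_l) (none, none)
    match r.1 with
    | some c => some c
    | none => r.2

-- ===== PRECONDITION & SPEC =====
def Spec_normalize_to_canonical (predicted : Option String) (categories : List String) (out : Option String) : Prop := out = normalize_to_canonical_alt predicted categories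
instance (predicted : Option String) (categories : List String) (out : Option String) : Decidable (Spec_normalize_to_canonical predicted categories out) := by unfold Spec_normalize_to_canonical; infer_instance

-- ===== CLAIM (what is proved, stated in full; the proofs are below) =====
def Claim_equal_normalize_to_canonical : Prop := ∀ (predicted : Option String) (categories : List String), Dom_normalize_to_canonical predicted categories → Spec_normalize_to_canonical predicted categories (normalize_to_canonical predicted categories)

-- ===== LEMMAS AND PROOFS =====
-- B's foldl with accumulators (e, s) computes: keep e/s if already set, else the first match of the corresponding scan.
theorem foldl_altStep (p : String) (l : List String) (e s : Option String) :
    l.foldl (altStep p) (e, s) =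
      ((match e with | some c => some c | none => loopExact p l),
       (match s with | some c => some c | none => loopSub p l)) := by
  induction l generalizing e s with
  | nil => cases e <;> cases s <;> simp [loopExact, loopSub]
  | cons c cs ih =>
    cases e <;> cases s <;>
      simp only [List.foldl_cons, altStep, Option.isNone_none, Option.isNone_some,
        Bool.true_and, Bool.false_and, Bool.false_eq_true, if_false] <;>
      rw [ih] <;>
      simp only [loopExact, loopSub] <;>
      by_cases hE : (PySem.Str.lower c == p) = true <;>
      by_cases hS : (PySem.Str.isIn (PySem.Str.lower c) p || PySem.Str.isIn p (PySem.Str.lower c)) = true <;>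
      simp only [hE, hS, if_true, if_false, Bool.false_eq_true]

-- ===== VERDICT (by name: the statement is the Claim_ definition above) =====
theorem normalize_to_canonical_spec : Claim_equal_normalize_to_canonical := by
  intro predicted categories _
  unfold Spec_normalize_to_canonical normalize_to_canonical normalize_to_canonical_alt
  cases predicted with
  | none => rfl
  | some p =>
    simp only [foldl_altStep]
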